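-- pv_equiv track=rewrite | github.com/yinchyu/python | algorithm/algorithm_2.py | stackvisit
-- ===== SOURCE A (Python) =====
-- def stackvisit(strings):
--     """
--     如果没有匹配完到就返回栈剩余元素长度，如果匹配完就返回嵌套的深度
--     :param strings:
--     :return:
--     """
--     newstack = []
--     deep = 0
--     for i in strings:
--         if i == "(":
--             newstack.append(i)
--             if len(newstack) > deep:
--                 deep = len(newstack)
--         if i == ")":
--             if len(newstack) > 0:
--                 temp = newstack[-1]
--                 if temp == "(":
--                     newstack.pop()
--                 elif temp == ")":
--                     newstack.append(i)
--             elif len(newstack) == 0: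
--                 newstack.append(i)
--     if len(newstack) == 0:
--         return deep
--     else:
--         return -len(newstack)
-- ===== SOURCE B (Python) =====
-- def stackvisit(strings):
--     # Build the list of running paren-depth prefix sums, then reduce:
--     # balanced iff the prefix never dips below 0 and ends at 0; then the answer
--     # is the maximal prefix (max nesting depth).  Otherwise the leftover stack
--     # size is last - 2*min (unmatched opens = last - min, unmatched closes = -min).
--     prefix = [0]
--     for c in strings:
--         if c == "(":
--             prefix.append(prefix[-1] + 1)
--         elif c == ")":
--             prefix.append(prefix[-1] - 1)
--     last = prefix[-1]
--     low = min(prefix)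
--     if low >= 0 and last == 0:
--         return max(prefix)
--     return -(last - 2 * low)
-- ===== Notes on version B (the rewrite author's own statement) =====
-- stated objective: alternative
-- what changed: Replaces the online stack simulation (push/pop with top-of-stack inspection) by a staged prefix-sum computation: first materialise the list of running paren-depth prefix sums, then answer with min/max/last reductions over that list (balanced iff min>=0 and last==0, depth = max prefix, leftover = last - 2*min).
import Mathlib
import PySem

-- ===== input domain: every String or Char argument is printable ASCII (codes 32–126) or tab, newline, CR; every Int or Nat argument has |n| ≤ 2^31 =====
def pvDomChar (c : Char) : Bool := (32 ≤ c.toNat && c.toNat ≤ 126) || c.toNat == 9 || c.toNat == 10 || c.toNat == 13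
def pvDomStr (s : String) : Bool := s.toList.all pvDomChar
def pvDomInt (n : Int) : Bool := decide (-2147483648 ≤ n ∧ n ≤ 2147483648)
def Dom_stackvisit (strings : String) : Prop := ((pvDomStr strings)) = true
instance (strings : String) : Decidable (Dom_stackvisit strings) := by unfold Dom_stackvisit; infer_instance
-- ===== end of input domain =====

-- B replaces A's online stack simulation by staged passes: build the list of running
-- paren-depth prefix sums, then reduce it with min/max/last; objective: alternative algorithm.


-- ===== PORT A =====
-- transliteration of A: fold over the string keeping the character stack and deep
def stackvisitStep (st : List Char × Int) (i : Char) : List Char × Int :=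
  let st :=
    if i = '(' then
      let ns := st.1 ++ ['(']
      (ns, if (ns.length : Int) > st.2 then (ns.length : Int) else st.2)
    else st
  if i = ')' then
    if st.1.length > 0 then
      -- temp = newstack[-1]
      match st.1.getLast? with
      | some '(' => (st.1.dropLast, st.2)   -- newstack.pop()
      | some ')' => (st.1 ++ [')'], st.2)   -- newstack.append(i)
      | _ => st
    else (st.1 ++ [')'], st.2)
  else st

def stackvisit (strings : String) : Int :=
  let st := strings.toList.foldl stackvisitStep ([], 0)
  if st.1.length = 0 then st.2 else -(st.1.length : Int)

-- ===== PORT B =====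
-- B builds the list of running prefix sums; prefix[-1] is ported with pyGetD
-- (the list starts as [0] and only grows, so the default is never used)
def pfxStep (acc : List Int) (c : Char) : List Int :=
  if c = '(' then acc ++ [PySem.List.pyGetD acc (-1) 0 + 1]
  else if c = ')' then acc ++ [PySem.List.pyGetD acc (-1) 0 - 1]
  else acc

def stackvisit_alt (strings : String) : Int :=
  let p := strings.toList.foldl pfxStep [(0 : Int)]
  let last := PySem.List.pyGetD p (-1) 0
  let low := (PySem.List.min? p (fun y => y)).getD 0   -- min(prefix); p is never empty
  if low ≥ 0 ∧ last = 0 then (PySem.List.max? p (fun y => y)).getD 0   -- max(prefix)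
  else -(last - 2 * low)

-- ===== PRECONDITION & SPEC =====
def Spec_stackvisit (strings : String) (out : Int) : Prop := out = stackvisit_alt strings
instance (strings : String) (out : Int) : Decidable (Spec_stackvisit strings out) := by unfold Spec_stackvisit; infer_instance

-- ===== CLAIM (what is proved, stated in full; the proofs are below) =====
def Claim_equal_stackvisit : Prop := ∀ (strings : String), Dom_stackvisit strings → Spec_stackvisit strings (stackvisit strings)

-- ===== LEMMAS AND PROOFS =====

-- ghost counters (proof-only): (open_count, unmatched_close, deep)
def cntStep (st : Int × Int × Int) (ch : Char) : Int × Int × Int :=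
  if ch = '(' then
    (st.1 + 1, st.2.1, if st.1 + 1 > st.2.2 then st.1 + 1 else st.2.2)
  else if ch = ')' then
    if st.1 > 0 then (st.1 - 1, st.2.1, st.2.2)
    else (st.1, st.2.1 + 1, st.2.2)
  else st

-- A's stack is always some unmatched ')'s below some open '('s
def mkStack (o u : Int) : List Char :=
  List.replicate u.toNat ')' ++ List.replicate o.toNat '('

theorem mkStack_length (o u : Int) (ho : 0 ≤ o) (hu : 0 ≤ u) :
    ((mkStack o u).length : Int) = o + u := by
  simp [mkStack]; omega

-- stage 1: A's stack fold is simulated by the ghost counters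
theorem fold_inv : ∀ (l : List Char) (o u dA dB : Int), 0 ≤ o → 0 ≤ u → (u = 0 → dA = dB) →
    ∃ dA', List.foldl stackvisitStep (mkStack o u, dA) l =
        (mkStack (List.foldl cntStep (o, u, dB) l).1
                 (List.foldl cntStep (o, u, dB) l).2.1, dA') ∧
      0 ≤ (List.foldl cntStep (o, u, dB) l).1 ∧
      0 ≤ (List.foldl cntStep (o, u, dB) l).2.1 ∧
      ((List.foldl cntStep (o, u, dB) l).2.1 = 0 →
        dA' = (List.foldl cntStep (o, u, dB) l).2.2) := by
  intro l
  induction l with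
  | nil => intro o u dA dB ho hu hd; exact ⟨dA, rfl, ho, hu, hd⟩
  | cons c rest ih =>
    intro o u dA dB ho hu hd
    simp only [List.foldl_cons]
    by_cases hop : c = '('
    · subst hop
      have hstepA : stackvisitStep (mkStack o u, dA) '(' =
          (mkStack (o + 1) u, if (o + u + 1 : Int) > dA then (o + u + 1 : Int) else dA) := by
        have h1 : mkStack o u ++ ['('] = mkStack (o + 1) u := by
          simp [mkStack]
          have : (o + 1).toNat = o.toNat + 1 := by omega
          rw [this, List.replicate_succ']
        have hlen : ((mkStack o u ++ ['(']).length : Int) = o + u + 1 := by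
          simp [mkStack]; omega
        simp only [stackvisitStep]
        rw [if_neg (by decide : ¬(('(' : Char) = ')'))]
        rw [hlen, h1]
        norm_num
      have hstepB : cntStep (o, u, dB) '(' =
          (o + 1, u, if o + 1 > dB then o + 1 else dB) := by
        simp [cntStep]
      rw [hstepA, hstepB]
      apply ih <;> try omega
    · by_cases hcl : c = ')'
      · subst hcl
        by_cases ho0 : o = 0
        · subst ho0
          by_cases hu0 : u = 0
          · subst hu0
            have hA : stackvisitStep (mkStack 0 0, dA) ')' = (mkStack 0 1, dA) := by
              simp [stackvisitStep, mkStack]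
            have hB : cntStep (0, 0, dB) ')' = (0, 1, dB) := by
              simp [cntStep]
            rw [hA, hB]
            apply ih <;> omega
          · -- u > 0 : top of stack is ')', append
            have hA : stackvisitStep (mkStack 0 u, dA) ')' = (mkStack 0 (u + 1), dA) := by
              have hne : mkStack 0 u ≠ [] := by
                simp [mkStack]; omega
              have hlast : (mkStack 0 u).getLast? = some ')' := by
                have h0 : (0 : Int).toNat = 0 := rfl
                simp only [mkStack, h0, List.replicate_zero, List.append_nil]
                rw [List.getLast?_replicate]
                rw [if_neg (by omega)]
              have happ : mkStack 0 u ++ [')'] = mkStack 0 (u + 1) := by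
                simp [mkStack]
                have : (u + 1).toNat = u.toNat + 1 := by omega
                rw [this, List.replicate_succ']
              have hpos : (mkStack 0 u).length > 0 := by simp [mkStack]; omega
              simp only [stackvisitStep, if_neg (by decide : ¬ ((')' : Char) = '('))]
              rw [if_pos hpos, hlast]
              simp [happ]
            have hB : cntStep (0, u, dB) ')' = (0, u + 1, dB) := by
              simp [cntStep]
            rw [hA, hB]
            apply ih <;> try omega
        · -- o > 0 : top is '(', pop
          have hA : stackvisitStep (mkStack o u, dA) ')' = (mkStack (o - 1) u, dA) := by
            have hne : mkStack o u ≠ [] := by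
              simp [mkStack]; omega
            have hlast : (mkStack o u).getLast? = some '(' := by
              have hrep : (List.replicate o.toNat '(').getLast? = some '(' := by
                rw [List.getLast?_replicate]; rw [if_neg (by omega)]
              simp only [mkStack]
              rw [List.getLast?_append_of_ne_nil _ (by simp; omega)]
              exact hrep
            have hdrop : (mkStack o u).dropLast = mkStack (o - 1) u := by
              have h1 : o.toNat = (o - 1).toNat + 1 := by omega
              simp only [mkStack, h1, List.replicate_succ', ← List.append_assoc,
                List.dropLast_concat]
            have hpos : (mkStack o u).length > 0 := by simp [mkStack]; omega
            simp only [stackvisitStep, if_neg (by decide : ¬ ((')' : Char) = '('))]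
            rw [if_pos hpos, hlast]
            simp [hdrop]
          have hB : cntStep (o, u, dB) ')' = (o - 1, u, dB) := by
            simp [cntStep]
            omega
          rw [hA, hB]
          apply ih <;> try omega
      · have hA : stackvisitStep (mkStack o u, dA) c = (mkStack o u, dA) := by
          simp [stackvisitStep, hop, hcl]
        have hB : cntStep (o, u, dB) c = (o, u, dB) := by
          simp [cntStep, hop, hcl]
        rw [hA, hB]
        exact ih o u dA dB ho hu hd

-- running min / max of a nonempty prefix list
def pmin : List Int → Int
  | [] => 0
  | x :: t => t.foldl min x

def pmax : List Int → Int
  | [] => 0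
  | x :: t => t.foldl max x

theorem pmin_append (acc : List Int) (hne : acc ≠ []) (v : Int) :
    pmin (acc ++ [v]) = min (pmin acc) v := by
  cases acc with
  | nil => exact absurd rfl hne
  | cons x t => simp [pmin, List.foldl_append]

theorem pmax_append (acc : List Int) (hne : acc ≠ []) (v : Int) :
    pmax (acc ++ [v]) = max (pmax acc) v := by
  cases acc with
  | nil => exact absurd rfl hne
  | cons x t => simp [pmax, List.foldl_append]

-- stage 2: B's prefix-sum list is summarised by the ghost counters:
-- last = o - u, min = -u, and (while u = 0) max = deep
theorem pfx_inv : ∀ (l : List Char) (acc : List Int) (o u d : Int),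
    acc ≠ [] → 0 ≤ o → 0 ≤ u →
    PySem.List.pyGetD acc (-1) 0 = o - u →
    pmin acc = -u →
    PySem.List.pyGetD acc (-1) 0 ≤ pmax acc →
    (u = 0 → pmax acc = d) →
    (l.foldl pfxStep acc) ≠ [] ∧
    PySem.List.pyGetD (l.foldl pfxStep acc) (-1) 0 =
      (l.foldl cntStep (o, u, d)).1 - (l.foldl cntStep (o, u, d)).2.1 ∧
    pmin (l.foldl pfxStep acc) = -(l.foldl cntStep (o, u, d)).2.1 ∧
    ((l.foldl cntStep (o, u, d)).2.1 = 0 →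
      pmax (l.foldl pfxStep acc) = (l.foldl cntStep (o, u, d)).2.2) := by
  intro l
  induction l with
  | nil => intro acc o u d hne ho hu hl hm _ hM; exact ⟨hne, hl, hm, hM⟩
  | cons c rest ih =>
    intro acc o u d hne ho hu hl hm hLM hM
    simp only [List.foldl_cons]
    by_cases hop : c = '('
    · subst hop
      have hstep : pfxStep acc '(' = acc ++ [o - u + 1] := by
        simp [pfxStep, hl]
      have hcs : cntStep (o, u, d) '(' =
          (o + 1, u, if o + 1 > d then o + 1 else d) := by simp [cntStep]
      rw [hstep, hcs]
      apply ih
      · simp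
      · omega
      · omega
      · rw [PySem.List.pyGetD_neg_one_append_singleton]; ring
      · rw [pmin_append acc hne, hm]; omega
      · rw [PySem.List.pyGetD_neg_one_append_singleton, pmax_append acc hne]
        exact le_max_right _ _
      · intro hu0
        rw [pmax_append acc hne, hM hu0]
        subst hu0
        split_ifs <;> omega
    · by_cases hcl : c = ')'
      · subst hcl
        have hstep : pfxStep acc ')' = acc ++ [o - u - 1] := by
          simp [pfxStep, hl]
        rw [hstep]
        by_cases ho0 : o > 0
        · have hcs : cntStep (o, u, d) ')' = (o - 1, u, d) := by
            simp [cntStep]; omega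
          rw [hcs]
          apply ih
          · simp
          · omega
          · omega
          · rw [PySem.List.pyGetD_neg_one_append_singleton]; ring
          · rw [pmin_append acc hne, hm]; omega
          · rw [PySem.List.pyGetD_neg_one_append_singleton, pmax_append acc hne]
            exact le_max_right _ _
          · intro hu0
            rw [pmax_append acc hne, hM hu0]
            have hMax := hLM
            rw [hl] at hMax
            have hd0 := hM hu0
            omega
        · have hcs : cntStep (o, u, d) ')' = (o, u + 1, d) := by
            simp [cntStep]; omega
          rw [hcs]
          apply ih
          · simp
          · omega
          · omega
          · rw [PySem.List.pyGetD_neg_one_append_singleton]; ring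
          · rw [pmin_append acc hne, hm]; omega
          · rw [PySem.List.pyGetD_neg_one_append_singleton, pmax_append acc hne]
            exact le_max_right _ _
          · intro h; omega
      · have hstep : pfxStep acc c = acc := by simp [pfxStep, hop, hcl]
        have hcs : cntStep (o, u, d) c = (o, u, d) := by simp [cntStep, hop, hcl]
        rw [hstep, hcs]
        exact ih acc o u d hne ho hu hl hm hLM hM

-- ===== VERDICT (by name: the statement is the Claim_ definition above) =====
theorem stackvisit_spec : Claim_equal_stackvisit := by
  intro s _
  unfold Spec_stackvisit stackvisit stackvisit_alt
  obtain ⟨dA', heq, ho, hu, hd⟩ :=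
    fold_inv s.toList 0 0 0 0 (le_refl 0) (le_refl 0) (fun _ => rfl)
  obtain ⟨hne, hlast, hlow, hmax⟩ :=
    pfx_inv s.toList [(0 : Int)] 0 0 0 (by simp) (le_refl 0) (le_refl 0)
      (by decide) (by simp [pmin]) (by decide) (fun _ => by simp [pmax])
  have h0 : mkStack 0 0 = ([] : List Char) := by simp [mkStack]
  rw [h0] at heq
  set r := List.foldl cntStep (0, 0, 0) s.toList with hr
  set p := List.foldl pfxStep [(0 : Int)] s.toList with hp
  simp only [heq]
  -- min(p) and max(p) via pmin/pmax
  obtain ⟨x, t, hxt⟩ := List.exists_cons_of_ne_nil hne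
  have hminp : (PySem.List.min? p (fun y => y)).getD 0 = pmin p := by
    rw [hxt, PySem.List.min?_id_cons]; rfl
  have hmaxp : (PySem.List.max? p (fun y => y)).getD 0 = pmax p := by
    rw [hxt, PySem.List.max?_id_cons]; rfl
  have hlen : ((mkStack r.1 r.2.1).length : Int) = r.1 + r.2.1 := mkStack_length _ _ ho hu
  by_cases hz : r.1 = 0 ∧ r.2.1 = 0
  · rw [if_pos (by simp [mkStack, hz.1, hz.2])]
    rw [hminp, hmaxp, hlow, hlast]
    rw [if_pos (by constructor <;> omega)]
    rw [hmax hz.2, hd hz.2]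
  · rw [if_neg (by intro h; apply hz; constructor <;> omega)]
    rw [hminp, hlow, hlast]
    rw [if_neg (by intro ⟨h1, h2⟩; apply hz; constructor <;> omega)]
    rw [hlen]
    ring
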